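-- pv_equiv track=rewrite | github.com/Ai-Whisperers/ultrametric-antigen-AI | research/codon-encoder/development/02_genetic_code_padic.py | codon_to_ternary_index
-- ===== SOURCE A (Python) =====
-- def codon_to_ternary_index(codon):
--     """Map codon to index in 3^9 ternary space.
--
--     Encoding: Each nucleotide → 2 ternary digits (covers 4 bases with 3^2=9 > 4)
--     A=(0,0), C=(0,1), G=(1,0), T/U=(1,1)
--
--     3 nucleotides × 2 trits = 6 trits, padded to 9.
--     """
--     nuc_encoding = {
--         "A": (0, 0),
--         "C": (0, 1),
--         "G": (1, 0),
--         "T": (1, 1),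
--         "U": (1, 1),  # RNA
--     }
--
--     trits = []
--     for nuc in codon:
--         trits.extend(nuc_encoding[nuc])
--
--     # Pad to 9 trits
--     while len(trits) < 9:
--         trits.append(0)
--
--     # Convert to index in 3^9 space
--     result = 0
--     for i, t in enumerate(trits):
--         result += t * (3 ** (8 - i))
--
--     return result
-- ===== SOURCE B (Python) =====
-- def codon_to_ternary_index(codon):
--     """Map codon to index in 3^9 ternary space.
--
--     Each nucleotide contributes its 2-trit value 3*t0+t1 (A=0, C=1, G=3, T/U=4)
--     weighted by its positional power 3**(7-2k); trailing pad zeros add nothing.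
--     """
--     NUC_VAL = {"A": 0, "C": 1, "G": 3, "T": 4, "U": 4}
--     return sum(NUC_VAL[nuc] * 3 ** (7 - 2 * k) for k, nuc in enumerate(codon))
-- ===== Notes on version B (the rewrite author's own statement) =====
-- stated objective: idiomatic
-- what changed: B replaces A's three passes (build a trit list, pad it to 9 with a while loop, then sum digit*3^(8-i)) by a single weighted sum: each nucleotide maps straight to its 2-trit value (A=0,C=1,G=3,T/U=4) and contributes value*3^(7-2k), with no intermediate trits list and no padding.
-- outside the precondition, e.g. on codon_to_ternary_index('GCAUAUCA'): A returns 6816.152263374486, B returns 6816.152263374485; on codon_to_ternary_index('ACGTU'): A returns 337.3333333333333, B returns 337.3333333333333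
import Mathlib
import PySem

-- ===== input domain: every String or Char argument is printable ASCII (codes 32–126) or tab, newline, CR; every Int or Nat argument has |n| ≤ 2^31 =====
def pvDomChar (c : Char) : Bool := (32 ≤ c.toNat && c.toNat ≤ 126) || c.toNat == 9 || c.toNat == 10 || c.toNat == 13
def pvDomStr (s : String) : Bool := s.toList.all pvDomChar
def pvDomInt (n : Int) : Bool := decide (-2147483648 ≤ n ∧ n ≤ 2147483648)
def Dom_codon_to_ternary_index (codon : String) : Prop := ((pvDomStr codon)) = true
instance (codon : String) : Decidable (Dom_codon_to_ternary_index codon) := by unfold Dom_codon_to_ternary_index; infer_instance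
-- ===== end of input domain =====

-- B replaces A's trit-list + pad + positional sum by a single per-nucleotide weighted sum (idiomatic, same cost);
-- return-value equivalence is proved on codons of ≤ 4 nucleotides over A/C/G/T/U (see Pre_ below).

-- ===== PORT A =====
-- A's body on the character list of the codon (Python iterates the string; helper keeps the port structural).
def pvA_core (cs : List Char) : Int :=
  let nuc_encoding : PySem.Dict Char (Int × Int) :=
    PySem.Dict.ofList [('A', (0, 0)), ('C', (0, 1)), ('G', (1, 0)), ('T', (1, 1)), ('U', (1, 1))]
  -- trits = []; for nuc in codon: trits.extend(nuc_encoding[nuc])   (none = KeyError, excluded by Pre_)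
  let trits : List Int := cs.foldl (fun acc nuc =>
    match nuc_encoding.get? nuc with
    | some (a, b) => acc ++ [a, b]
    | none => acc) []
  -- while len(trits) < 9: trits.append(0)
  let trits := trits ++ List.replicate (9 - trits.length) 0
  -- result = 0; for i, t in enumerate(trits): result += t * 3 ** (8 - i)
  -- exponent 8 - i is ≥ 0 exactly when len(trits) ≤ 9 (guaranteed inside Pre_; on longer
  -- codons Python produces a float, which is outside the declared Int type and outside Pre_).
  (PySem.List.enumerate trits).foldl (fun result p => result + p.2 * 3 ^ (8 - p.1).toNat) 0

def codon_to_ternary_index (codon : String) : Int := pvA_core codon.toList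

-- ===== PORT B =====
-- B's body on the character list: sum of NUC_VAL[nuc] * 3 ** (7 - 2*k) over enumerate(codon).
-- getD's default is never used inside Pre_ (missing key = KeyError, excluded); exponent
-- 7 - 2k is ≥ 0 exactly when k ≤ 3, i.e. inside Pre_'s length bound.
def pvB_core (cs : List Char) : Int :=
  let nucVal : PySem.Dict Char Int :=
    PySem.Dict.ofList [('A', 0), ('C', 1), ('G', 3), ('T', 4), ('U', 4)]
  (PySem.List.enumerate cs).foldl (fun s p => s + nucVal.getD p.2 0 * 3 ^ (7 - 2 * p.1).toNat) 0

def codon_to_ternary_index_alt (codon : String) : Int := pvB_core codon.toList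

-- ===== PRECONDITION & SPEC =====
-- Pre_ excludes codons with a character outside A/C/G/T/U (A raises KeyError there) and codons
-- longer than 4 nucleotides, on which A's negative exponents 3**(8-i) make it return a float,
-- not a value of the declared int type.
def Pre_codon_to_ternary_index (codon : String) : Prop :=
  codon.toList.length ≤ 4 ∧
  codon.toList.all (fun c => c ∈ ['A', 'C', 'G', 'T', 'U']) = true
instance (codon : String) : Decidable (Pre_codon_to_ternary_index codon) := by
  unfold Pre_codon_to_ternary_index; infer_instance

def pvWitness_codon_to_ternary_index : String := "ACG"

def Spec_codon_to_ternary_index (codon : String) (out : Int) : Prop := out = codon_to_ternary_index_alt codon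
instance (codon : String) (out : Int) : Decidable (Spec_codon_to_ternary_index codon out) := by unfold Spec_codon_to_ternary_index; infer_instance

-- ===== CLAIM (what is proved, stated in full; the proofs are below) =====
def Claim_equal_codon_to_ternary_index : Prop := ∀ (codon : String), Dom_codon_to_ternary_index codon → Pre_codon_to_ternary_index codon → Spec_codon_to_ternary_index codon (codon_to_ternary_index codon)

-- ===== LEMMAS AND PROOFS =====

-- On every admissible character list (≤ 4 chars, all nucleotides) the two cores agree:
-- finite case analysis, each closed case decided by computation.
theorem pv_core_eq (cs : List Char) (hlen : cs.length ≤ 4)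
    (hmem : ∀ c ∈ cs, c = 'A' ∨ c = 'C' ∨ c = 'G' ∨ c = 'T' ∨ c = 'U') :
    pvA_core cs = pvB_core cs := by
  rcases cs with _ | ⟨a, _ | ⟨b, _ | ⟨c, _ | ⟨d, _ | ⟨e, t⟩⟩⟩⟩⟩
  · decide
  · rcases hmem a (by simp) with rfl | rfl | rfl | rfl | rfl <;> decide
  · rcases hmem a (by simp) with rfl | rfl | rfl | rfl | rfl <;>
      rcases hmem b (by simp) with rfl | rfl | rfl | rfl | rfl <;> decide
  · rcases hmem a (by simp) with rfl | rfl | rfl | rfl | rfl <;>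
      rcases hmem b (by simp) with rfl | rfl | rfl | rfl | rfl <;>
      rcases hmem c (by simp) with rfl | rfl | rfl | rfl | rfl <;> decide
  · rcases hmem a (by simp) with rfl | rfl | rfl | rfl | rfl <;>
      rcases hmem b (by simp) with rfl | rfl | rfl | rfl | rfl <;>
      rcases hmem c (by simp) with rfl | rfl | rfl | rfl | rfl <;>
      rcases hmem d (by simp) with rfl | rfl | rfl | rfl | rfl <;> decide
  · simp at hlen; omega

-- ===== VERDICT (by name: the statement is the Claim_ definition above) =====
theorem codon_to_ternary_index_spec : Claim_equal_codon_to_ternary_index := by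
  intro codon _ hpre
  unfold Spec_codon_to_ternary_index codon_to_ternary_index codon_to_ternary_index_alt
  refine pv_core_eq codon.toList hpre.1 ?_
  intro c hc
  have h := List.all_eq_true.mp hpre.2 c hc
  simpa using h
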